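-- pv_equiv track=rewrite | github.com/bernatrm/Udemy.Learn-to-code-with-python | 17-Dictionaries-the-Basics/coding-exercise-35.py | length_counts
-- ===== SOURCE A (Python) =====
-- def length_counts(strings):
--     result = {}
--     for string in strings:
--         length = len(string)
--         if length in result:
--             result[length] += 1
--         else:
--             result[length] = 1
--     return result
-- ===== SOURCE B (Python) =====
-- def length_counts(strings):
--     lengths = [len(s) for s in strings]
--     return {n: lengths.count(n) for n in dict.fromkeys(lengths)}
-- ===== Notes on version B (the rewrite author's own statement) =====
-- stated objective: alternative
-- what changed: B replaces the single hash-accumulation loop (check membership, then increment or initialise) by a two-phase strategy: materialise the list of lengths, dedup it in first-seen order with dict.fromkeys, and count each distinct length with list.count.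
import Mathlib
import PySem

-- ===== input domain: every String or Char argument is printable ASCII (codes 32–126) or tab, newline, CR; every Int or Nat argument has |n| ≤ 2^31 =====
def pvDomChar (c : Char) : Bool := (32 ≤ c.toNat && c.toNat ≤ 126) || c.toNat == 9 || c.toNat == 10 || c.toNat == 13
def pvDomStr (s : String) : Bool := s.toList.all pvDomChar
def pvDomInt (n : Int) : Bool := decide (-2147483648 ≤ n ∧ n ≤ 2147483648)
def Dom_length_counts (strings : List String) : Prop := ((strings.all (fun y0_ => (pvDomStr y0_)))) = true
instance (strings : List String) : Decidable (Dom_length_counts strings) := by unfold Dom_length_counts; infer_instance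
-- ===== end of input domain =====

-- ===== PORT A =====
-- Header: B counts by deduplicating the length list (first-seen order) and counting each
-- distinct length, instead of A's single dict-accumulation loop; objective: alternative.
def length_counts (strings : List String) : List (Int × Int) :=
  (strings.foldl (fun result string =>
    let length := PySem.Str.len string
    if result.contains length then
      result.modify length 0 (· + 1)
    else
      result.insert length 1) PySem.Dict.empty).items

-- ===== PORT B =====
def length_counts_alt (strings : List String) : List (Int × Int) :=
  let lengths := strings.map PySem.Str.len
  (PySem.List.dedup lengths).map (fun n => (n, (lengths.count n : Int)))

-- ===== PRECONDITION & SPEC =====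
def Spec_length_counts (strings : List String) (out : List (Int × Int)) : Prop := out = length_counts_alt strings
instance (strings : List String) (out : List (Int × Int)) : Decidable (Spec_length_counts strings out) := by unfold Spec_length_counts; infer_instance

-- ===== CLAIM (what is proved, stated in full; the proofs are below) =====
def Claim_equal_length_counts : Prop := ∀ (strings : List String), Dom_length_counts strings → Spec_length_counts strings (length_counts strings)

-- ===== LEMMAS AND PROOFS =====

-- ===== VERDICT (by name: the statement is the Claim_ definition above) =====
-- A's loop body equals the Counter step: when the key is absent, insert k 1 is modify k 0 (+1).
lemma stepA_eq_modify (d : PySem.Dict Int Int) (x : Int) :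
    (if d.contains x then d.modify x 0 (· + 1) else d.insert x 1) = d.modify x 0 (· + 1) := by
  split_ifs with h
  · rfl
  · have h0 : d.getD x 0 = 0 := by apply PySem.Dict.getD_of_not_contains; simpa using h
    simp [PySem.Dict.modify, h0]

-- ===== VERDICT =====
theorem length_counts_spec : Claim_equal_length_counts := by
  intro strings _
  unfold Spec_length_counts length_counts length_counts_alt
  have h1 : (strings.map PySem.Str.len).foldl
      (fun d x => if d.contains x then d.modify x 0 (· + 1) else d.insert x 1)
      PySem.Dict.empty = PySem.Dict.counter (strings.map PySem.Str.len) := by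
    rw [PySem.Dict.counter_eq_foldl]
    congr 1
    funext d x
    exact stepA_eq_modify d x
  rw [List.foldl_map] at h1
  simp only [h1, PySem.Dict.items_counter, PySem.List.dedup_eq_ofList]
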